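-- pv_equiv track=rewrite | github.com/mseatingtpe/readme-sunny | scripts/generate_readme.py | generate_media_section
-- ===== SOURCE A (Python) =====
-- def generate_media_section(media):
--     """Generate media & talks section from media.yaml."""
--     if not media:
--         return ""
--
--     interviews = sorted([m for m in media if m.get("type") == "interview"],
--                         key=lambda x: str(x.get("date", "")), reverse=True)
--     talks = sorted([m for m in media if m.get("type") == "talk"],
--                    key=lambda x: str(x.get("date", "")), reverse=True)
--     writing = sorted([m for m in media if m.get("type") == "writing"],
--                      key=lambda x: str(x.get("date", "")), reverse=True)
--
--     lines = ["## 媒體與分享\n"]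
--
--     if interviews:
--         lines.append("### 採訪報導\n")
--         lines.append("| 日期 | 標題 | 媒體 |")
--         lines.append("|------|------|------|")
--         for m in interviews:
--             date = str(m.get("date", ""))
--             title = m.get("title", "")
--             pub = m.get("publication", "")
--             url = m.get("url", "")
--             if url:
--                 lines.append(f"| {date} | [{title}]({url}) | {pub} |")
--             else:
--                 lines.append(f"| {date} | {title} | {pub} |")
--         lines.append("")
--
--     if talks:
--         lines.append("### 演講與論壇\n")
--         lines.append("| 日期 | 主題 | 場合 |")
--         lines.append("|------|------|------|")
--         for m in talks:
--             date = str(m.get("date", ""))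
--             title = m.get("title", "")
--             pub = m.get("publication", "")
--             url = m.get("url", "")
--             if url:
--                 lines.append(f"| {date} | [{title}]({url}) | {pub} |")
--             else:
--                 lines.append(f"| {date} | {title} | {pub} |")
--         lines.append("")
--
--     if writing:
--         lines.append("### 供稿\n")
--         lines.append("| 日期 | 標題 | 刊物 |")
--         lines.append("|------|------|------|")
--         for m in writing:
--             date = str(m.get("date", ""))
--             title = m.get("title", "")
--             pub = m.get("publication", "")
--             url = m.get("url", "")
--             if url:
--                 lines.append(f"| {date} | [{title}]({url}) | {pub} |")
--             else:
--                 lines.append(f"| {date} | {title} | {pub} |")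
--         lines.append("")
--
--     return "\n".join(lines)
-- ===== SOURCE B (Python) =====
-- def generate_media_section(media):
--     """Generate media & talks section from media.yaml."""
--     if not media:
--         return ""
--
--     RANK = {"interview": 0, "talk": 1, "writing": 2}
--     HEAD = [("### 採訪報導\n", "| 日期 | 標題 | 媒體 |"),
--             ("### 演講與論壇\n", "| 日期 | 主題 | 場合 |"),
--             ("### 供稿\n", "| 日期 | 標題 | 刊物 |")]
--
--     # One global multi-key stable sort instead of three filtered sorts:
--     # secondary key first (date, descending), then primary key (section rank).
--     items = [m for m in media if m.get("type") in RANK]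
--     items.sort(key=lambda m: str(m.get("date", "")), reverse=True)
--     items.sort(key=lambda m: RANK[m["type"]])
--
--     # Single linear emission pass with section-boundary detection.
--     lines = ["## 媒體與分享\n"]
--     prev = None
--     for m in items:
--         r = RANK[m["type"]]
--         if r != prev:
--             if prev is not None:
--                 lines.append("")
--             header, cols = HEAD[r]
--             lines.append(header)
--             lines.append(cols)
--             lines.append("|------|------|------|")
--             prev = r
--         date = str(m.get("date", ""))
--         title = m.get("title", "")
--         pub = m.get("publication", "")
--         url = m.get("url", "")
--         if url:
--             lines.append(f"| {date} | [{title}]({url}) | {pub} |")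
--         else:
--             lines.append(f"| {date} | {title} | {pub} |")
--     if prev is not None:
--         lines.append("")
--     return "\n".join(lines)
-- ===== Notes on version B (the rewrite author's own statement) =====
-- stated objective: alternative
-- what changed: Replaces A's three per-type filter+sort passes and three copy-pasted emit blocks with one global multi-key stable sort (all relevant items sorted by date descending, then stably by section rank) followed by a single linear emission loop that detects section boundaries and inserts headers/blank separators on the fly.
import Mathlib
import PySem

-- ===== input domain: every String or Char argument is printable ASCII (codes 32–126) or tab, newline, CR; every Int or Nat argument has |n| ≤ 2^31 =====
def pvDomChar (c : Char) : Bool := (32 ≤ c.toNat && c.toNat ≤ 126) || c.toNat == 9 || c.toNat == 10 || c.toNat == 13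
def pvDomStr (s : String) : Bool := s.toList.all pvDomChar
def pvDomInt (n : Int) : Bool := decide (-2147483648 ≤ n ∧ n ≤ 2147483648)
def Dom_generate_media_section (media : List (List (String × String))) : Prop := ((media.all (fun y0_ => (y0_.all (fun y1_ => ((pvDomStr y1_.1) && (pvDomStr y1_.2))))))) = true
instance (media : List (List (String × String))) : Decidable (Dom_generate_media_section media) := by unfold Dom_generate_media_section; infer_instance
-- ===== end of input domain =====

-- B replaces A's three per-type filter+sort passes and three copy-pasted emit blocks with one
-- global multi-key stable sort (date descending, then stably by section rank) and a single
-- linear emission loop detecting section boundaries (objective: alternative decomposition).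

-- ===== PORT A =====
-- (dicts are association lists; m.get(k) is first-match lookup, m.get(k, "") with default;
--  values are strings, so Python's str(...) on them is the identity)

def generate_media_section (media : List (List (String × String))) : String :=
  if media = [] then ""
  else
    let interviews := PySem.List.sorted
      (media.filter (fun m => List.lookup "type" m == some "interview"))
      (fun x => (List.lookup "date" x).getD "") true
    let talks := PySem.List.sorted
      (media.filter (fun m => List.lookup "type" m == some "talk"))
      (fun x => (List.lookup "date" x).getD "") true
    let writing := PySem.List.sorted
      (media.filter (fun m => List.lookup "type" m == some "writing"))
      (fun x => (List.lookup "date" x).getD "") true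
    let lines : List String := ["## 媒體與分享\n"]
    let lines :=
      if interviews ≠ [] then
        (interviews.foldl (fun ls m =>
            let date := (List.lookup "date" m).getD ""
            let title := (List.lookup "title" m).getD ""
            let pub := (List.lookup "publication" m).getD ""
            let url := (List.lookup "url" m).getD ""
            if url ≠ "" then
              ls ++ ["| " ++ date ++ " | [" ++ title ++ "](" ++ url ++ ") | " ++ pub ++ " |"]
            else
              ls ++ ["| " ++ date ++ " | " ++ title ++ " | " ++ pub ++ " |"])
          (lines ++ ["### 採訪報導\n", "| 日期 | 標題 | 媒體 |", "|------|------|------|"])) ++ [""]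
      else lines
    let lines :=
      if talks ≠ [] then
        (talks.foldl (fun ls m =>
            let date := (List.lookup "date" m).getD ""
            let title := (List.lookup "title" m).getD ""
            let pub := (List.lookup "publication" m).getD ""
            let url := (List.lookup "url" m).getD ""
            if url ≠ "" then
              ls ++ ["| " ++ date ++ " | [" ++ title ++ "](" ++ url ++ ") | " ++ pub ++ " |"]
            else
              ls ++ ["| " ++ date ++ " | " ++ title ++ " | " ++ pub ++ " |"])
          (lines ++ ["### 演講與論壇\n", "| 日期 | 主題 | 場合 |", "|------|------|------|"])) ++ [""]
      else lines
    let lines :=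
      if writing ≠ [] then
        (writing.foldl (fun ls m =>
            let date := (List.lookup "date" m).getD ""
            let title := (List.lookup "title" m).getD ""
            let pub := (List.lookup "publication" m).getD ""
            let url := (List.lookup "url" m).getD ""
            if url ≠ "" then
              ls ++ ["| " ++ date ++ " | [" ++ title ++ "](" ++ url ++ ") | " ++ pub ++ " |"]
            else
              ls ++ ["| " ++ date ++ " | " ++ title ++ " | " ++ pub ++ " |"])
          (lines ++ ["### 供稿\n", "| 日期 | 標題 | 刊物 |", "|------|------|------|"])) ++ [""]
      else lines
    PySem.Str.join "\n" lines

-- ===== PORT B =====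
-- Source B's RANK dict and HEAD list
def pvRANK : PySem.Dict String Int :=
  PySem.Dict.mk [("interview", 0), ("talk", 1), ("writing", 2)]
def pvHEAD : List (String × String) :=
  [("### 採訪報導\n", "| 日期 | 標題 | 媒體 |"),
   ("### 演講與論壇\n", "| 日期 | 主題 | 場合 |"),
   ("### 供稿\n", "| 日期 | 標題 | 刊物 |")]

-- RANK[m["type"]] (the "type" key is always present on the filtered items, so .getD "" is exact)
def pvRankOf (m : List (String × String)) : Int :=
  PySem.Dict.getD pvRANK ((List.lookup "type" m).getD "") 0

-- the date/title/pub/url row of Source B's loop body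
def pvRowB (m : List (String × String)) : String :=
  let date := (List.lookup "date" m).getD ""
  let title := (List.lookup "title" m).getD ""
  let pub := (List.lookup "publication" m).getD ""
  let url := (List.lookup "url" m).getD ""
  if url ≠ "" then
    "| " ++ date ++ " | [" ++ title ++ "](" ++ url ++ ") | " ++ pub ++ " |"
  else
    "| " ++ date ++ " | " ++ title ++ " | " ++ pub ++ " |"

-- one iteration of Source B's emission loop; state = (prev, lines)
def pvStepB (st : Option Int × List String) (m : List (String × String)) :
    Option Int × List String :=
  let r := pvRankOf m
  let st :=
    if st.1 ≠ some r then
      let ls := if st.1 = none then st.2 else st.2 ++ [""]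
      let hc := (PySem.List.pyGet? pvHEAD r).getD ("", "")
      (some r, ls ++ [hc.1, hc.2, "|------|------|------|"])
    else st
  (st.1, st.2 ++ [pvRowB m])

def generate_media_section_alt (media : List (List (String × String))) : String :=
  if media = [] then ""
  else
    let items := media.filter (fun m =>
      match List.lookup "type" m with
      | some t => PySem.Dict.contains pvRANK t
      | none => false)
    let items := PySem.List.sorted items (fun m => (List.lookup "date" m).getD "") true
    let items := PySem.List.sorted items pvRankOf false
    let st := items.foldl pvStepB (none, ["## 媒體與分享\n"])
    let lines := if st.1 ≠ none then st.2 ++ [""] else st.2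
    PySem.Str.join "\n" lines

-- ===== PRECONDITION & SPEC =====
def Spec_generate_media_section (media : List (List (String × String))) (out : String) : Prop := out = generate_media_section_alt media
instance (media : List (List (String × String))) (out : String) : Decidable (Spec_generate_media_section media out) := by unfold Spec_generate_media_section; infer_instance

-- ===== CLAIM (what is proved, stated in full; the proofs are below) =====
def Claim_equal_generate_media_section : Prop := ∀ (media : List (List (String × String))), Dom_generate_media_section media → Spec_generate_media_section media (generate_media_section media)

-- ===== LEMMAS AND PROOFS =====

-- abbreviations used only by the proofs
def pvKeyD (m : List (String × String)) : String := (List.lookup "date" m).getD ""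
def pvRelevant (m : List (String × String)) : Bool :=
  match List.lookup "type" m with
  | some t => PySem.Dict.contains pvRANK t
  | none => false

-- insertBy unfolding equations
theorem pv_insertBy_nil {α : Type} (before : α → α → Bool) (x : α) :
    PySem.List.insertBy before x [] = [x] := rfl
theorem pv_insertBy_cons {α : Type} (before : α → α → Bool) (x y : α) (ys : List α) :
    PySem.List.insertBy before x (y :: ys)
      = if before x y then x :: y :: ys else y :: PySem.List.insertBy before x ys := rfl

-- insertBy puts x between a prefix it is not-before and a suffix it is before
theorem pv_insertBy_mid {α : Type} (before : α → α → Bool) (x : α) (L R : List α)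
    (hL : ∀ a ∈ L, before x a = false) (hR : ∀ a ∈ R, before x a = true) :
    PySem.List.insertBy before x (L ++ R) = L ++ x :: R := by
  induction L with
  | nil =>
    cases R with
    | nil => simp [pv_insertBy_nil]
    | cons r rs => simp [pv_insertBy_cons, hR r (by simp)]
  | cons y ys ih =>
    have hy : before x y = false := hL y (by simp)
    simp only [List.cons_append, pv_insertBy_cons, hy]
    simp [ih (fun a ha => hL a (by simp [ha]))]

-- stable ascending sort of a list whose key takes only values 0,1,2 is the concatenation of the
-- three key-filters, in order
theorem pv_sorted_rank_partition {α : Type} (key : α → Int) (xs A B C : List α)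
    (hA : ∀ a ∈ A, key a = 0) (hB : ∀ a ∈ B, key a = 1) (hC : ∀ a ∈ C, key a = 2)
    (hxs : ∀ m ∈ xs, key m = 0 ∨ key m = 1 ∨ key m = 2) :
    xs.foldl (fun acc x => PySem.List.insertBy (fun a b => decide (key a < key b)) x acc)
        (A ++ (B ++ C))
      = (A ++ xs.filter (fun m => key m == 0))
        ++ ((B ++ xs.filter (fun m => key m == 1)) ++ (C ++ xs.filter (fun m => key m == 2))) := by
  induction xs generalizing A B C with
  | nil => simp
  | cons x xs ih =>
    simp only [List.foldl_cons, List.filter_cons]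
    rcases hxs x (by simp) with hx | hx | hx
    · rw [pv_insertBy_mid _ x A (B ++ C)
            (fun a ha => by simp [hx, hA a ha])
            (fun a ha => by rcases List.mem_append.1 ha with h | h
                            · simp [hx, hB a h]
                            · simp [hx, hC a h])]
      have := ih (A ++ [x]) B C
        (fun a ha => by rcases List.mem_append.1 ha with h | h
                        · exact hA a h
                        · simp at h; simp [h, hx])
        hB hC (fun m hm => hxs m (by simp [hm]))
      simp only [List.append_assoc, List.cons_append, List.nil_append] at this ⊢
      rw [this]
      simp [hx]
    · rw [show A ++ (B ++ C) = (A ++ B) ++ C by simp,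
          pv_insertBy_mid _ x (A ++ B) C
            (fun a ha => by rcases List.mem_append.1 ha with h | h
                            · simp [hx, hA a h]
                            · simp [hx, hB a h])
            (fun a ha => by simp [hx, hC a ha])]
      have := ih A (B ++ [x]) C hA
        (fun a ha => by rcases List.mem_append.1 ha with h | h
                        · exact hB a h
                        · simp at h; simp [h, hx])
        hC (fun m hm => hxs m (by simp [hm]))
      simp only [List.append_assoc, List.cons_append, List.nil_append] at this ⊢
      rw [this]
      simp [hx]
    · rw [show A ++ (B ++ C) = (A ++ B ++ C) ++ [] by simp,
          pv_insertBy_mid _ x (A ++ B ++ C) []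
            (fun a ha => by
              rcases List.mem_append.1 ha with h | h
              · rcases List.mem_append.1 h with h' | h'
                · simp [hx, hA a h']
                · simp [hx, hB a h']
              · simp [hx, hC a h])
            (by simp)]
      have := ih A B (C ++ [x]) hA hB
        (fun a ha => by rcases List.mem_append.1 ha with h | h
                        · exact hC a h
                        · simp at h; simp [h, hx])
        (fun m hm => hxs m (by simp [hm]))
      simp only [List.append_assoc, List.cons_append, List.nil_append] at this ⊢
      rw [this]
      simp [hx]

-- insertBy (reverse order by a string key) preserves "pairwise descending"
theorem pv_insertBy_pairwise (key : List (String × String) → String)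
    (x : List (String × String)) (acc : List (List (String × String)))
    (h : acc.Pairwise (fun a b => key b ≤ key a)) :
    (PySem.List.insertBy (fun a b => decide (key b < key a)) x acc).Pairwise
      (fun a b => key b ≤ key a) := by
  induction acc with
  | nil => simp [pv_insertBy_nil]
  | cons y ys ih =>
    rcases List.pairwise_cons.1 h with ⟨hy, hys⟩
    by_cases hxy : key y < key x
    · simp only [pv_insertBy_cons, hxy, decide_true, if_true]
      exact List.pairwise_cons.2 ⟨by
        intro a ha
        rcases List.mem_cons.1 ha with rfl | ha
        · exact le_of_lt hxy
        · exact le_trans (hy a ha) (le_of_lt hxy), h⟩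
    · simp only [pv_insertBy_cons, hxy, decide_false, Bool.false_eq_true, if_false]
      refine List.pairwise_cons.2 ⟨?_, ih hys⟩
      intro a ha
      rcases (PySem.List.mem_insertBy _ _ _ _).1 ha with rfl | ha
      · exact le_of_not_gt hxy
      · exact hy a ha

-- if x is before everything in M, insertBy prepends it
theorem pv_insertBy_front {α : Type} (before : α → α → Bool) (x : α) (M : List α)
    (h : ∀ a ∈ M, before x a = true) :
    PySem.List.insertBy before x M = x :: M := by
  cases M with
  | nil => simp [pv_insertBy_nil]
  | cons y ys => simp [pv_insertBy_cons, h y (by simp)]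

-- filter commutes with one stable reverse-insertion into a descending list
theorem pv_filter_insertBy (key : List (String × String) → String)
    (p : List (String × String) → Bool) (x : List (String × String))
    (acc : List (List (String × String)))
    (h : acc.Pairwise (fun a b => key b ≤ key a)) :
    (PySem.List.insertBy (fun a b => decide (key b < key a)) x acc).filter p
      = if p x then PySem.List.insertBy (fun a b => decide (key b < key a)) x (acc.filter p)
        else acc.filter p := by
  induction acc with
  | nil => cases hp : p x <;> simp [pv_insertBy_nil, List.filter, hp]
  | cons y ys ih =>
    rcases List.pairwise_cons.1 h with ⟨hy, hys⟩
    by_cases hxy : key y < key x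
    · rw [pv_insertBy_cons, if_pos (by simp [hxy])]
      cases hp : p x with
      | false => simp [List.filter_cons, hp]
      | true =>
        cases hpy : p y with
        | true =>
          simp only [List.filter_cons, hp, hpy, if_true]
          rw [pv_insertBy_cons, if_pos (by simp [hxy])]
        | false =>
          simp only [List.filter_cons, hp, hpy, if_true]
          rw [pv_insertBy_front _ x _ (fun a ha => by
            have := hy a (List.mem_of_mem_filter ha)
            simp [lt_of_le_of_lt this hxy])]
    · rw [pv_insertBy_cons, if_neg (by simp [hxy])]
      cases hp : p x with
      | false =>
        cases hpy : p y with
        | false =>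
          simp only [List.filter_cons, hpy, Bool.false_eq_true, if_false]
          rw [ih hys, if_neg (by simp [hp])]
        | true =>
          simp only [List.filter_cons, hpy, if_true]
          rw [ih hys, if_neg (by simp [hp])]
          simp
      | true =>
        cases hpy : p y with
        | true =>
          simp only [List.filter_cons, hpy, if_true]
          rw [pv_insertBy_cons, if_neg (by simp [hxy]), ih hys, if_pos hp]
        | false =>
          simp only [List.filter_cons, hpy, Bool.false_eq_true, if_false]
          rw [ih hys, if_pos hp]
          simp

-- filter commutes with the whole reverse stable sort
theorem pv_filter_sorted_rev (key : List (String × String) → String)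
    (p : List (String × String) → Bool) (xs : List (List (String × String))) :
    (PySem.List.sorted xs key true).filter p = PySem.List.sorted (xs.filter p) key true := by
  rw [PySem.List.sorted_rev_eq_foldl_insertBy, PySem.List.sorted_rev_eq_foldl_insertBy]
  have main : ∀ (l : List (List (String × String))) (acc : List (List (String × String))),
      acc.Pairwise (fun a b => key b ≤ key a) →
      (l.foldl (fun acc x => PySem.List.insertBy (fun a b => decide (key b < key a)) x acc) acc).filter p
        = (l.filter p).foldl
            (fun acc x => PySem.List.insertBy (fun a b => decide (key b < key a)) x acc)
            (acc.filter p) := by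
    intro l
    induction l with
    | nil => intro acc h; simp
    | cons x xs ih =>
      intro acc h
      simp only [List.foldl_cons, List.filter_cons]
      rw [ih _ (pv_insertBy_pairwise key x acc h)]
      rw [pv_filter_insertBy key p x acc h]
      cases hp : p x <;> simp
  simpa using main xs [] (by simp)

-- A's inline row-emitting loop body is `fun ls m => ls ++ [pvRowB m]`
theorem pv_rowStep_eq :
    (fun (ls : List String) (m : List (String × String)) =>
        let date := (List.lookup "date" m).getD ""
        let title := (List.lookup "title" m).getD ""
        let pub := (List.lookup "publication" m).getD ""
        let url := (List.lookup "url" m).getD ""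
        if url ≠ "" then
          ls ++ ["| " ++ date ++ " | [" ++ title ++ "](" ++ url ++ ") | " ++ pub ++ " |"]
        else
          ls ++ ["| " ++ date ++ " | " ++ title ++ " | " ++ pub ++ " |"])
      = (fun ls m => ls ++ [pvRowB m]) := by
  funext ls m
  simp only [pvRowB]
  split <;> rfl

-- pvRelevant and pvRankOf on a single item, by cases on its "type" value
theorem pv_item_class (m : List (String × String)) :
    (pvRelevant m = true →
      pvRankOf m = 0 ∨ pvRankOf m = 1 ∨ pvRankOf m = 2) ∧
    ((pvRelevant m && (pvRankOf m == (0 : Int)))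
        = (List.lookup "type" m == some "interview")) ∧
    ((pvRelevant m && (pvRankOf m == (1 : Int)))
        = (List.lookup "type" m == some "talk")) ∧
    ((pvRelevant m && (pvRankOf m == (2 : Int)))
        = (List.lookup "type" m == some "writing")) := by
  cases hl : List.lookup "type" m with
  | none => simp [pvRelevant, hl]
  | some s =>
    by_cases e1 : s = "interview"
    · subst e1; simp [pvRelevant, pvRankOf, hl]; decide
    by_cases e2 : s = "talk"
    · subst e2; simp [pvRelevant, pvRankOf, hl]; decide
    by_cases e3 : s = "writing"
    · subst e3; simp [pvRelevant, pvRankOf, hl]; decide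
    have c : PySem.Dict.contains pvRANK s = false := by
      simp [pvRANK, PySem.Dict.contains]
      exact ⟨fun h => e1 h.symm, fun h => e2 h.symm, fun h => e3 h.symm⟩
    simp [pvRelevant, pvRankOf, hl, c, e1, e2, e3]

-- A's three section filters are the rank filters of B's relevance filter
theorem pv_filter_section (media : List (List (String × String))) (t : String) (k : Int)
    (ht : (t = "interview" ∧ k = 0) ∨ (t = "talk" ∧ k = 1) ∨ (t = "writing" ∧ k = 2)) :
    (media.filter pvRelevant).filter (fun m => pvRankOf m == k)
      = media.filter (fun m => List.lookup "type" m == some t) := by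
  rw [List.filter_filter]
  apply List.filter_congr
  intro m _
  rcases ht with ⟨rfl, rfl⟩ | ⟨rfl, rfl⟩ | ⟨rfl, rfl⟩
  · rw [Bool.and_comm]; exact (pv_item_class m).2.1
  · rw [Bool.and_comm]; exact (pv_item_class m).2.2.1
  · rw [Bool.and_comm]; exact (pv_item_class m).2.2.2

-- run lemmas for the emission fold
theorem pv_foldl_step_same (S : List (List (String × String))) (k : Int) (L : List String)
    (hS : ∀ m ∈ S, pvRankOf m = k) :
    S.foldl pvStepB (some k, L) = (some k, L ++ S.map pvRowB) := by
  induction S generalizing L with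
  | nil => simp
  | cons m S ih =>
    simp only [List.foldl_cons, List.map_cons]
    rw [show pvStepB (some k, L) m = (some k, L ++ [pvRowB m]) by
      simp [pvStepB, hS m (by simp)]]
    rw [ih _ (fun a ha => hS a (by simp [ha]))]
    simp

theorem pv_foldl_step_run (S : List (List (String × String))) (k : Int) (p : Option Int)
    (L : List String) (hS : ∀ m ∈ S, pvRankOf m = k) (hne : S ≠ []) (hp : p ≠ some k) :
    S.foldl pvStepB (p, L)
      = (some k,
         ((if p = none then L else L ++ [""])
           ++ [((PySem.List.pyGet? pvHEAD k).getD ("", "")).1,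
               ((PySem.List.pyGet? pvHEAD k).getD ("", "")).2,
               "|------|------|------|"]) ++ S.map pvRowB) := by
  cases S with
  | nil => exact absurd rfl hne
  | cons m S =>
    simp only [List.foldl_cons, List.map_cons]
    rw [show pvStepB (p, L) m
        = (some k,
           ((if p = none then L else L ++ [""])
             ++ [((PySem.List.pyGet? pvHEAD k).getD ("", "")).1,
                 ((PySem.List.pyGet? pvHEAD k).getD ("", "")).2,
                 "|------|------|------|"]) ++ [pvRowB m]) by
      have hm := hS m (by simp)
      simp only [pvStepB, hm]
      rw [if_pos (by simpa using hp)]]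
    rw [pv_foldl_step_same _ k _ (fun a ha => hS a (by simp [ha]))]
    simp

-- the three header triples B reads from pvHEAD, as literals
theorem pv_head0 : ((PySem.List.pyGet? pvHEAD (0 : Int)).getD ("", ""))
    = ("### 採訪報導\n", "| 日期 | 標題 | 媒體 |") := by decide
theorem pv_head1 : ((PySem.List.pyGet? pvHEAD (1 : Int)).getD ("", ""))
    = ("### 演講與論壇\n", "| 日期 | 主題 | 場合 |") := by decide
theorem pv_head2 : ((PySem.List.pyGet? pvHEAD (2 : Int)).getD ("", ""))
    = ("### 供稿\n", "| 日期 | 標題 | 刊物 |") := by decide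

-- flattening singleton rows is mapping
theorem pv_flatten_singleton {α β : Type} (f : α → β) (S : List α) :
    (List.map (fun x => [f x]) S).flatten = List.map f S := by
  induction S with
  | nil => rfl
  | cons x xs ih => simp [ih]

-- B's single boundary-detecting pass over S0 ++ S1 ++ S2 produces A's three section blocks
theorem pv_assemble (S0 S1 S2 : List (List (String × String)))
    (h0 : ∀ m ∈ S0, pvRankOf m = 0) (h1 : ∀ m ∈ S1, pvRankOf m = 1)
    (h2 : ∀ m ∈ S2, pvRankOf m = 2) :
    (let st := List.foldl pvStepB (none, ["## 媒體與分享\n"]) (S0 ++ (S1 ++ S2));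
     if st.1 ≠ none then st.2 ++ [""] else st.2)
    = (let lines : List String := ["## 媒體與分享\n"];
       let lines := if S0 ≠ [] then
         (S0.foldl (fun ls m => ls ++ [pvRowB m])
           (lines ++ ["### 採訪報導\n", "| 日期 | 標題 | 媒體 |", "|------|------|------|"])) ++ [""]
         else lines;
       let lines := if S1 ≠ [] then
         (S1.foldl (fun ls m => ls ++ [pvRowB m])
           (lines ++ ["### 演講與論壇\n", "| 日期 | 主題 | 場合 |", "|------|------|------|"])) ++ [""]
         else lines;
       let lines := if S2 ≠ [] then
         (S2.foldl (fun ls m => ls ++ [pvRowB m])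
           (lines ++ ["### 供稿\n", "| 日期 | 標題 | 刊物 |", "|------|------|------|"])) ++ [""]
         else lines;
       lines) := by
  simp only [List.foldl_append]
  by_cases c0 : S0 = [] <;> by_cases c1 : S1 = [] <;> by_cases c2 : S2 = [] <;>
    simp only [c0, c1, c2, List.foldl_nil, ne_eq, not_true_eq_false, not_false_eq_true,
               if_true, if_false, ite_not] <;>
    first
    | rfl
    | (repeat'
        first
        | rw [pv_foldl_step_run _ 0 _ _ h0 c0 (by simp)]
        | rw [pv_foldl_step_run _ 1 _ _ h1 c1 (by simp)]
        | rw [pv_foldl_step_run _ 2 _ _ h2 c2 (by simp)])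
      <;> simp [pv_head0, pv_head1, pv_head2, pv_flatten_singleton, List.append_assoc]

-- every member of a section list has the section's rank
theorem pv_rank_mem (media : List (List (String × String))) (t : String) (k : Int)
    (ht : PySem.Dict.getD pvRANK t 0 = k) (m : List (String × String))
    (hm : m ∈ PySem.List.sorted (media.filter (fun m => List.lookup "type" m == some t))
            (fun x => (List.lookup "date" x).getD "") true) :
    pvRankOf m = k := by
  rw [PySem.List.mem_sorted] at hm
  have := (List.mem_filter.1 hm).2
  simp only [beq_iff_eq] at this
  simp [pvRankOf, this, ht]

-- ===== VERDICT (by name: the statement is the Claim_ definition above) =====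
theorem generate_media_section_spec : Claim_equal_generate_media_section := by
  intro media _
  unfold Spec_generate_media_section generate_media_section generate_media_section_alt
  by_cases h : media = []
  · simp [h]
  simp only [if_neg h]
  have hrel : (media.filter (fun m =>
      match List.lookup "type" m with
      | some t => PySem.Dict.contains pvRANK t
      | none => false)) = media.filter pvRelevant := rfl
  rw [hrel, pv_rowStep_eq]
  -- B's double stable sort is the concatenation of A's three section lists
  have hpart : PySem.List.sorted
      (PySem.List.sorted (media.filter pvRelevant) (fun m => (List.lookup "date" m).getD "") true)
      pvRankOf false
      = PySem.List.sorted (media.filter (fun m => List.lookup "type" m == some "interview"))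
          (fun x => (List.lookup "date" x).getD "") true
        ++ (PySem.List.sorted (media.filter (fun m => List.lookup "type" m == some "talk"))
              (fun x => (List.lookup "date" x).getD "") true
            ++ PySem.List.sorted (media.filter (fun m => List.lookup "type" m == some "writing"))
                (fun x => (List.lookup "date" x).getD "") true) := by
    rw [PySem.List.sorted_eq_foldl_insertBy]
    have hpartition := pv_sorted_rank_partition pvRankOf
      (PySem.List.sorted (media.filter pvRelevant) (fun m => (List.lookup "date" m).getD "") true)
      [] [] [] (by simp) (by simp) (by simp)
      (fun m hm => by
        rw [PySem.List.mem_sorted] at hm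
        exact (pv_item_class m).1 (List.mem_filter.1 hm).2)
    simp only [List.nil_append] at hpartition
    rw [hpartition,
        pv_filter_sorted_rev _ _ _, pv_filter_sorted_rev _ _ _, pv_filter_sorted_rev _ _ _,
        pv_filter_section media "interview" 0 (Or.inl ⟨rfl, rfl⟩),
        pv_filter_section media "talk" 1 (Or.inr (Or.inl ⟨rfl, rfl⟩)),
        pv_filter_section media "writing" 2 (Or.inr (Or.inr ⟨rfl, rfl⟩))]
  rw [hpart]
  rw [pv_assemble _ _ _
        (pv_rank_mem media "interview" 0 (by decide))
        (pv_rank_mem media "talk" 1 (by decide))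
        (pv_rank_mem media "writing" 2 (by decide))]
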